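-- pv_equiv track=rewrite | github.com/snowink1137/TIL | 1.first-semester/algorithm/programmers/kakao_2018/food_broadcast_live.py | solution
-- ===== SOURCE A (Python) =====
-- def solution(food_times, k):
--     if sum(food_times) <= k:
--         return -1
--
--     enum_food_times = []
--     for index, food_time in enumerate(food_times):
--         enum_food_times.append([index, food_time])
--
--     enum_food_times.sort(key=lambda x: x[1])
--     length = len(enum_food_times)
--     time = enum_food_times[0][1]
--     cycle = 0
--     cnt = 0
--
--     while k > length * (time - cycle):
--         k -= length * (time - cycle)
--         length -= 1
--         cycle += time - cycle
--         # enum_food_times.pop(0)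
--         cnt += 1
--         time = enum_food_times[cnt][1]
--
--     enum_food_times = sorted(enum_food_times[cnt:], key=lambda x: x[0])
--     answer = enum_food_times[k % length][0] + 1
--
--     return answer
-- ===== SOURCE B (Python) =====
-- def solution(food_times, k):
--     if sum(food_times) <= k:
--         return -1
--
--     def consumed(x):
--         # total seconds spent once every plate has been reduced to min(t, x)
--         return sum(min(t, x) for t in food_times)
--
--     lo, hi = 0, max(food_times)
--     while lo < hi:
--         mid = (lo + hi) // 2
--         if consumed(mid) >= k:
--             hi = mid
--         else:
--             lo = mid + 1
--     remaining = [i for i, t in enumerate(food_times) if t >= lo]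
--     return remaining[(k - consumed(lo - 1)) % len(remaining)] + 1
-- ===== Notes on version B (the rewrite author's own statement) =====
-- stated objective: alternative
-- what changed: B replaces A's stable sort plus cursor-driven eating simulation by a binary search for the stopping level x (least x with sum(min(t,x)) >= k), then picks the answer from the plates with t >= x in original index order.
-- outside the precondition, e.g. on solution([-1], -2): A returns 1, B raises ZeroDivisionError
import Mathlib
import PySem

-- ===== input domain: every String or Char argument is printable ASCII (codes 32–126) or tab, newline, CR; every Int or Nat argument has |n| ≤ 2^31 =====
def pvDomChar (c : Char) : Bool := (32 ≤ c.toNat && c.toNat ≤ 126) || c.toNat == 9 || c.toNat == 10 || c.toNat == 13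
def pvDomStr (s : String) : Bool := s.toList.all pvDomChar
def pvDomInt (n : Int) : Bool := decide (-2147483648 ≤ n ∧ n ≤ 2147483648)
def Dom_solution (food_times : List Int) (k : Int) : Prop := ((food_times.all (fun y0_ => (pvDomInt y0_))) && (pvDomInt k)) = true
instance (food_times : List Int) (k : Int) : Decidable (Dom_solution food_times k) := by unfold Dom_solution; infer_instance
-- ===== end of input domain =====

-- B replaces A's sort + cursor simulation by a binary search on the stopping level; objective: alternative algorithm.

-- ===== PORT A =====
-- A's while loop: state (k, length, cycle), cursor walking the time-sorted list; `cur` is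
-- enum_food_times[cnt], `rest` the elements after it.  Where Python would raise IndexError
-- (cnt running past the end, only reachable for k < 0) the port returns a junk triple.
def aLoop (k len cyc : Int) (cur : Int × Int) (rest : List (Int × Int)) :
    Int × Int × List (Int × Int) :=
  if len * (cur.2 - cyc) < k then
    match rest with
    | [] => (k - len * (cur.2 - cyc), len - 1, [])   -- Python: IndexError here
    | c2 :: r2 => aLoop (k - len * (cur.2 - cyc)) (len - 1) cur.2 c2 r2
  else (k, len, cur :: rest)

def solution (food_times : List Int) (k : Int) : Int :=
  if food_times.sum ≤ k then -1
  else
    -- the index/food_time append loop is enumerate; .sort(key=lambda x: x[1]) is the stable key-sort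
    match PySem.List.sorted (PySem.List.enumerate food_times 0) (fun x => x.2) false with
    | [] => 0   -- Python: IndexError on enum_food_times[0] (reachable only for k < 0)
    | c :: r =>
      let res := aLoop k ((r.length : Int) + 1) 0 c r
      let rem2 := PySem.List.sorted res.2.2 (fun x => x.1) false
      (PySem.List.pyGetD rem2 (PySem.Int.mod res.1 res.2.1) ((0 : Int), (0 : Int))).1 + 1

-- ===== PORT B =====
-- consumed(x) = sum(min(t, x) for t in food_times)
def consumedB (food_times : List Int) (x : Int) : Int :=
  (food_times.map (fun t => min t x)).sum

-- the `while lo < hi` binary search of Source B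
def bLoop (food_times : List Int) (k lo hi : Int) : Int :=
  if lo < hi then
    let mid := PySem.Int.floordiv (lo + hi) 2
    if k ≤ consumedB food_times mid then bLoop food_times k lo mid
    else bLoop food_times k (mid + 1) hi
  else lo
termination_by (hi - lo).toNat
decreasing_by
  all_goals
    have h1 := PySem.Int.floordiv_lt_iff_lt_mul (a := lo + hi) (b := 2) (q := hi) (by omega)
    have h2 := PySem.Int.le_floordiv_iff_mul_le (a := lo + hi) (b := 2) (q := lo) (by omega)
    omega

def solution_alt (food_times : List Int) (k : Int) : Int :=
  if food_times.sum ≤ k then -1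
  else
    match PySem.List.max? food_times (fun x => x) with
    | none => 0   -- Python: ValueError from max([]) (reachable only for k < 0)
    | some hi =>
      let lo := bLoop food_times k 0 hi
      let remaining := ((PySem.List.enumerate food_times 0).filter
        (fun p => decide (lo ≤ p.2))).map (fun p => p.1)
      PySem.List.pyGetD remaining
        (PySem.Int.mod (k - consumedB food_times (lo - 1)) ((remaining.length : Int))) 0 + 1

-- ===== PRECONDITION & SPEC =====
-- Pre_ excludes negative k (outside the problem's domain): there A's leftover-cycle arithmetic
-- returns accidental values or raises IndexError, and B may raise too.
def Pre_solution (food_times : List Int) (k : Int) : Prop := 0 ≤ k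
instance (food_times : List Int) (k : Int) : Decidable (Pre_solution food_times k) := by
  unfold Pre_solution; infer_instance
def pvWitness_solution : List Int × Int := ([3, 1, 2], 5)
def Spec_solution (food_times : List Int) (k : Int) (out : Int) : Prop := out = solution_alt food_times k
instance (food_times : List Int) (k : Int) (out : Int) : Decidable (Spec_solution food_times k out) := by unfold Spec_solution; infer_instance

-- ===== CLAIM (what is proved, stated in full; the proofs are below) =====
def Claim_equal_solution : Prop := ∀ (food_times : List Int) (k : Int), Dom_solution food_times k → Pre_solution food_times k → Spec_solution food_times k (solution food_times k)

-- ===== LEMMAS AND PROOFS =====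

theorem sum_nonpos_int (l : List Int) (h : ∀ x ∈ l, x ≤ 0) : l.sum ≤ 0 := by
  induction l with
  | nil => simp
  | cons a t ih =>
    have ha := h a (by simp)
    have ht := ih (fun x hx => h x (by simp [hx]))
    simp only [List.sum_cons]
    omega

def sumSnd (P : List (Int × Int)) : Int := (P.map (fun p => p.2)).sum

theorem aLoop_spec (full : List (Int × Int)) (k0 : Int)
    (hsort : full.Pairwise (fun a b => a.2 ≤ b.2)) (hsum : k0 < sumSnd full) :
    ∀ (rest P : List (Int × Int)) (cur : Int × Int) (k cyc : Int),
    full = P ++ cur :: rest →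
    k = k0 - sumSnd P - ((rest.length : Int) + 1) * cyc →
    (∀ p ∈ P, p.2 ≤ cyc) →
    ((P = [] ∧ cyc = 0 ∧ 0 ≤ k) ∨ (0 < k ∧ cyc ∈ P.map (fun p => p.2))) →
    ∃ (Q : List (Int × Int)) (cyc' : Int) (cur' : Int × Int) (rest' : List (Int × Int)) (ke : Int),
      full = Q ++ cur' :: rest' ∧
      ke = k0 - sumSnd Q - ((rest'.length : Int) + 1) * cyc' ∧
      aLoop k ((rest.length : Int) + 1) cyc cur rest = (ke, (rest'.length : Int) + 1, cur' :: rest') ∧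
      (∀ p ∈ Q, p.2 ≤ cyc') ∧
      ((Q = [] ∧ cyc' = 0 ∧ 0 ≤ ke) ∨ (0 < ke ∧ cyc' ∈ Q.map (fun p => p.2))) ∧
      ke ≤ ((rest'.length : Int) + 1) * (cur'.2 - cyc') := by
  intro rest
  induction rest with
  | nil =>
    intro P cur k cyc hfull hk hPle hinv
    have hsum' : sumSnd full = sumSnd P + cur.2 := by
      subst hfull; simp [sumSnd]
    have hcond : ¬ (((List.length ([] : List (Int × Int)) : Int) + 1) * (cur.2 - cyc) < k) := by
      simp only [List.length_nil, Nat.cast_zero, zero_add, one_mul] at hk ⊢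
      omega
    rw [aLoop, if_neg hcond]
    exact ⟨P, cyc, cur, [], k, hfull, hk, rfl, hPle, hinv, by
      simp only [List.length_nil, Nat.cast_zero, zero_add, one_mul] at hcond ⊢; omega⟩
  | cons c2 r2 ih =>
    intro P cur k cyc hfull hk hPle hinv
    have hPcur : ∀ p ∈ P, p.2 ≤ cur.2 := by
      intro p hp
      have := (List.pairwise_append.mp (hfull ▸ hsort)).2.2 p hp cur (List.mem_cons_self)
      exact this
    by_cases hcond : ((List.length (c2 :: r2) : Int) + 1) * (cur.2 - cyc) < k
    · rw [aLoop, if_pos hcond]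
      have hlen : ((List.length (c2 :: r2) : Int) + 1) - 1 = (r2.length : Int) + 1 := by
        push_cast [List.length_cons]; ring
      obtain ⟨Q, cyc', cur', rest', ke, h1, h2, h3, h4, h5, h6⟩ :=
        ih (P ++ [cur]) c2 (k - ((List.length (c2 :: r2) : Int) + 1) * (cur.2 - cyc)) cur.2
          (by rw [hfull, List.append_assoc]; rfl)
          (by subst hk; simp only [sumSnd, List.map_append, List.sum_append, List.map_cons,
                List.map_nil, List.sum_cons, List.sum_nil, List.length_cons]; push_cast; ring)
          (by intro p hp
              rcases List.mem_append.mp hp with h | h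
              · exact hPcur p h
              · simp at h; rw [h])
          (Or.inr ⟨by omega, by simp⟩)
      refine ⟨Q, cyc', cur', rest', ke, h1, h2, ?_, h4, h5, h6⟩
      rw [hlen]
      exact h3
    · rw [aLoop, if_neg hcond]
      exact ⟨P, cyc, cur, c2 :: r2, k, hfull, hk, rfl, hPle, hinv, by omega⟩

theorem consumedB_mono (food_times : List Int) {x y : Int} (h : x ≤ y) :
    consumedB food_times x ≤ consumedB food_times y := by
  unfold consumedB
  apply List.sum_le_sum
  intro p hp
  exact min_le_min le_rfl h

theorem bLoop_spec (food_times : List Int) (k : Int) :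
    ∀ (n : Nat) (lo hi : Int), (hi - lo).toNat ≤ n → 0 ≤ lo → lo ≤ hi →
    k ≤ consumedB food_times hi → (lo = 0 ∨ consumedB food_times (lo - 1) < k) →
    0 ≤ bLoop food_times k lo hi ∧ bLoop food_times k lo hi ≤ hi ∧
      k ≤ consumedB food_times (bLoop food_times k lo hi) ∧
      (bLoop food_times k lo hi = 0 ∨ consumedB food_times (bLoop food_times k lo hi - 1) < k) := by
  intro n
  induction n with
  | zero =>
    intro lo hi hn h0 hlh hhi hlo
    have heq : lo = hi := by omega
    rw [bLoop, if_neg (by omega)]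
    subst heq
    exact ⟨h0, le_rfl, hhi, hlo⟩
  | succ n ih =>
    intro lo hi hn h0 hlh hhi hlo
    by_cases hlt : lo < hi
    · have h1 := PySem.Int.floordiv_lt_iff_lt_mul (a := lo + hi) (b := 2) (q := hi) (by omega)
      have h2 := PySem.Int.le_floordiv_iff_mul_le (a := lo + hi) (b := 2) (q := lo) (by omega)
      rw [bLoop, if_pos hlt]
      by_cases hc : k ≤ consumedB food_times (PySem.Int.floordiv (lo + hi) 2)
      · simp only [if_pos hc]
        obtain ⟨a, b, c, d⟩ := ih lo (PySem.Int.floordiv (lo + hi) 2) (by omega) h0 (by omega) hc hlo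
        exact ⟨a, by omega, c, d⟩
      · simp only [if_neg hc]
        apply ih (PySem.Int.floordiv (lo + hi) 2 + 1) hi (by omega) (by omega) (by omega) hhi
        right
        simpa using not_le.mp hc
    · rw [bLoop, if_neg hlt]
      have heq : lo = hi := le_antisymm hlh (not_lt.mp hlt)
      subst heq
      exact ⟨h0, le_rfl, hhi, hlo⟩

theorem consumedB_split (food_times : List Int) (Q R : List (Int × Int))
    (hperm : (Q ++ R).Perm (PySem.List.enumerate food_times 0)) (x : Int)
    (hQ : ∀ p ∈ Q, p.2 ≤ x) (hR : ∀ p ∈ R, x ≤ p.2) :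
    consumedB food_times x = sumSnd Q + (R.length : Int) * x := by
  have hmap : (PySem.List.enumerate food_times 0).map (fun p => p.2) = food_times :=
    PySem.List.map_snd_enumerate food_times 0
  have hp2 : ((Q ++ R).map (fun p => min p.2 x)).Perm (food_times.map (fun t => min t x)) := by
    have := (hperm.map (fun p => p.2)).map (fun t => min t x)
    simpa [hmap, Function.comp] using this
  have hsum : consumedB food_times x = ((Q ++ R).map (fun p => min p.2 x)).sum := by
    unfold consumedB
    exact (hp2.sum_eq).symm
  rw [hsum, List.map_append, List.sum_append]
  congr 1
  · unfold sumSnd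
    congr 1
    exact List.map_congr_left (fun p hp => min_eq_left (hQ p hp))
  · have : R.map (fun p => min p.2 x) = R.map (fun _ => x) :=
      List.map_congr_left (fun p hp => min_eq_right (hR p hp))
    rw [this, PySem.List.sum_map_const_int]

theorem main_eq (food_times : List Int) (k : Int) (hpre : 0 ≤ k) :
    solution food_times k = solution_alt food_times k := by
  by_cases hle : food_times.sum ≤ k
  · rw [solution, solution_alt, if_pos hle, if_pos hle]
  · have hks : k < food_times.sum := not_le.mp hle
    have hne : food_times ≠ [] := by
      rintro rfl; simp at hks; omega
    have hmap : (PySem.List.enumerate food_times 0).map (fun p => p.2) = food_times :=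
      PySem.List.map_snd_enumerate food_times 0
    have hperm : (PySem.List.sorted (PySem.List.enumerate food_times 0) (fun x => x.2) false).Perm
        (PySem.List.enumerate food_times 0) := PySem.List.sorted_perm _ _ _
    have hsne : PySem.List.sorted (PySem.List.enumerate food_times 0) (fun x => x.2) false ≠ [] := by
      intro h
      rw [PySem.List.sorted_eq_nil_iff] at h
      apply hne
      rw [← hmap, h, List.map_nil]
    obtain ⟨c, r, hcr⟩ := List.exists_cons_of_ne_nil hsne
    have hsort : (PySem.List.sorted (PySem.List.enumerate food_times 0) (fun x => x.2) false).Pairwise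
        (fun a b => a.2 ≤ b.2) := PySem.List.sorted_pairwise _ _
    have hsum_s : sumSnd (PySem.List.sorted (PySem.List.enumerate food_times 0) (fun x => x.2) false)
        = food_times.sum := by
      unfold sumSnd
      rw [(hperm.map (fun p => p.2)).sum_eq, hmap]
    obtain ⟨Q, cyc', cur', rest', ke, hfull, hke, haloop, hQle, hinv, hexit⟩ :=
      aLoop_spec _ k hsort (by rw [hsum_s]; exact hks) r [] c k 0 hcr
        (by simp [sumSnd]) (by simp) (Or.inl ⟨rfl, rfl, hpre⟩)
    -- abbreviations
    set R : List (Int × Int) := cur' :: rest' with hR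
    set m : Int := (rest'.length : Int) + 1 with hm
    have hmpos : 0 < m := by positivity
    have hpermQR : (Q ++ R).Perm (PySem.List.enumerate food_times 0) := hfull ▸ hperm
    -- max? of a nonempty list
    obtain ⟨hi, hhi⟩ : ∃ hi, PySem.List.max? food_times (fun x => x) = some hi := by
      cases hmx : PySem.List.max? food_times (fun x => x) with
      | none => exact absurd ((PySem.List.max?_eq_none_iff food_times (fun x => x)).mp hmx) hne
      | some hi => exact ⟨hi, rfl⟩
    have hhimax : ∀ t ∈ food_times, t ≤ hi := by
      intro t ht
      exact PySem.List.max?_isMax hhi t ht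
    have hfhi : k ≤ consumedB food_times hi := by
      have : consumedB food_times hi = food_times.sum := by
        unfold consumedB
        rw [List.map_congr_left (fun t ht => min_eq_left (hhimax t ht)), List.map_id']
      omega
    have hhi0 : 0 ≤ hi := by
      by_contra hneg
      have : food_times.sum ≤ 0 :=
        sum_nonpos_int food_times (fun t ht => le_trans (hhimax t ht) (by omega))
      omega
    obtain ⟨hρ0, hρhi, hρge, hρlo⟩ :=
      bLoop_spec food_times k ((hi - 0).toNat) 0 hi le_rfl le_rfl hhi0 hfhi (Or.inl rfl)
    set ρ := bLoop food_times k 0 hi with hρ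
    -- pairwise facts across the split
    have hQR : ∀ p ∈ Q, ∀ q ∈ R, p.2 ≤ q.2 := by
      intro p hp q hq
      exact (List.pairwise_append.mp (hfull ▸ hsort)).2.2 p hp q hq
    have hpairR : (cur' :: rest').Pairwise (fun a b : Int × Int => a.2 ≤ b.2) :=
      (List.pairwise_append.mp (hfull ▸ hsort)).2.1
    have hRsort : ∀ q ∈ R, cur'.2 ≤ q.2 := by
      intro q hq
      rcases List.mem_cons.mp hq with h | h
      · rw [h]
      · exact List.rel_of_pairwise_cons hpairR h
    -- (a): consumed plates lie strictly below ρ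
    have hQlt : ∀ p ∈ Q, p.2 < ρ := by
      rcases hinv with ⟨hQnil, _, _⟩ | ⟨hkepos, hcycmem⟩
      · intro p hp; rw [hQnil] at hp; simp at hp
      · obtain ⟨q, hq, hq2⟩ := List.mem_map.mp hcycmem
        have hcycR : ∀ p ∈ R, cyc' ≤ p.2 := fun p hp => hq2 ▸ hQR q hq p hp
        have hfc : consumedB food_times cyc' = sumSnd Q + (R.length : Int) * cyc' :=
          consumedB_split food_times Q R hpermQR cyc' hQle hcycR
        have hRlen : (R.length : Int) = m := by simp [hR, hm]
        have hcyclt : cyc' < ρ := by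
          by_contra hge
          have := consumedB_mono food_times (not_lt.mp hge)
          rw [hfc, hRlen] at this
          omega
        intro p hp
        exact lt_of_le_of_lt (hQle p hp) hcyclt
    -- (b): remaining plates lie at or above ρ
    have hRge : ∀ p ∈ R, ρ ≤ p.2 := by
      have hcur : ρ ≤ cur'.2 := by
        by_contra hlt
        rw [not_le] at hlt
        rcases hρlo with hz | hfl
        · -- ρ = 0 and cur'.2 < 0: the sum of the nonpositive parts would be negative
          rw [hz] at hlt hρge
          have hmem : cur'.2 ∈ food_times := by
            have : cur' ∈ PySem.List.enumerate food_times 0 :=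
              hpermQR.mem_iff.mp (by simp [hR])
            rw [← hmap]
            exact List.mem_map_of_mem this
          obtain ⟨l1, l2, hsplit⟩ := List.append_of_mem hmem
          have h1 : (l1.map (fun t => min t 0)).sum ≤ 0 :=
            sum_nonpos_int _ (by rintro x hx; simp only [List.mem_map] at hx; obtain ⟨t, _, rfl⟩ := hx; exact min_le_right _ _)
          have h2 : (l2.map (fun t => min t 0)).sum ≤ 0 :=
            sum_nonpos_int _ (by rintro x hx; simp only [List.mem_map] at hx; obtain ⟨t, _, rfl⟩ := hx; exact min_le_right _ _)
          have : consumedB food_times 0 ≤ min cur'.2 0 + 0 := by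
            unfold consumedB
            rw [hsplit]
            simp only [List.map_append, List.map_cons, List.sum_append, List.sum_cons]
            omega
          have hminneg : min cur'.2 0 < 0 := by omega
          omega
        · -- consumedB (ρ - 1) < k, but consumedB cur'.2 contradicts the exit condition
          have hQcur : ∀ p ∈ Q, p.2 ≤ cur'.2 := fun p hp => hQR p hp cur' (by simp [hR])
          have hfc : consumedB food_times cur'.2 = sumSnd Q + (R.length : Int) * cur'.2 :=
            consumedB_split food_times Q R hpermQR cur'.2 hQcur hRsort
          have hRlen : (R.length : Int) = m := by simp [hR, hm]
          have hmono := consumedB_mono food_times (show cur'.2 ≤ ρ - 1 by omega)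
          rw [hfc, hRlen] at hmono
          have hexp : m * (cur'.2 - cyc') = m * cur'.2 - m * cyc' := by ring
          omega
      intro p hp
      exact le_trans hcur (hRsort p hp)
    -- (c): the sorted remainder is the index-filtered enumeration
    have hfilterQ : Q.filter (fun p => decide (ρ ≤ p.2)) = [] := by
      rw [List.filter_eq_nil_iff]
      intro p hp
      simp only [decide_eq_true_eq, not_le]
      exact hQlt p hp
    have hfilterR : R.filter (fun p => decide (ρ ≤ p.2)) = R :=
      List.filter_eq_self.mpr (fun p hp => by simpa using hRge p hp)
    have hfs : (PySem.List.sorted (PySem.List.enumerate food_times 0) (fun x => x.2) false).filter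
        (fun p => decide (ρ ≤ p.2)) = R := by
      rw [hfull, List.filter_append, hfilterQ, hfilterR, List.nil_append]
    have hpermR : R.Perm ((PySem.List.enumerate food_times 0).filter (fun p => decide (ρ ≤ p.2))) :=
      hfs ▸ hperm.filter (fun p => decide (ρ ≤ p.2))
    have hpairF : (((PySem.List.enumerate food_times 0).filter (fun p => decide (ρ ≤ p.2)))).Pairwise
        (fun a b => a.1 < b.1) :=
      List.Pairwise.sublist List.filter_sublist (PySem.List.pairwise_lt_enumerate food_times 0)
    have hsortR : PySem.List.sorted R (fun x => x.1) false
        = (PySem.List.enumerate food_times 0).filter (fun p => decide (ρ ≤ p.2)) :=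
      PySem.List.sorted_eq_of_perm_of_pairwise_lt R _ (fun x => x.1) hpermR.symm hpairF
    have hRlen : (R.length : Int) = m := by simp [hR, hm]
    have hlenF : (((PySem.List.enumerate food_times 0).filter (fun p => decide (ρ ≤ p.2))).length : Int)
        = m := by rw [← hpermR.length_eq, hRlen]
    -- (e): both offsets agree modulo m
    have hfρ1 : consumedB food_times (ρ - 1) = sumSnd Q + (R.length : Int) * (ρ - 1) :=
      consumedB_split food_times Q R hpermQR (ρ - 1)
        (fun p hp => by have := hQlt p hp; omega)
        (fun p hp => by have := hRge p hp; omega)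
    have hmodeq : PySem.Int.mod (k - consumedB food_times (ρ - 1)) m = PySem.Int.mod ke m := by
      rw [PySem.Int.mod_eq_emod_of_pos hmpos, PySem.Int.mod_eq_emod_of_pos hmpos]
      have harith : k - consumedB food_times (ρ - 1) = ke + m * (cyc' - ρ + 1) := by
        rw [hfρ1, hRlen, hke]; ring
      rw [harith, Int.add_mul_emod_self_left]
    have hposn : 0 ≤ PySem.Int.mod ke m := PySem.Int.mod_nonneg ke hmpos
    have hposl : PySem.Int.mod ke m < m := PySem.Int.mod_lt ke hmpos
    -- (f): evaluate both ports
    have hA : solution food_times k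
        = (PySem.List.pyGetD ((PySem.List.enumerate food_times 0).filter (fun p => decide (ρ ≤ p.2)))
            (PySem.Int.mod ke m) ((0 : Int), (0 : Int))).1 + 1 := by
      rw [solution, if_neg hle, hcr]
      simp only [haloop, hsortR]
    have hB : solution_alt food_times k
        = PySem.List.pyGetD (((PySem.List.enumerate food_times 0).filter
            (fun p => decide (ρ ≤ p.2))).map (fun p => p.1)) (PySem.Int.mod ke m) (0 : Int) + 1 := by
      rw [solution_alt, if_neg hle, hhi]
      simp only [← hρ, List.length_map, hlenF, hmodeq]
    rw [hA, hB]
    have hlen2 : PySem.Int.mod ke m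
        < ((((PySem.List.enumerate food_times 0).filter (fun p => decide (ρ ≤ p.2))).length : Int)) := by
      omega
    rw [PySem.List.pyGetD_eq_getElem _ _ hposn hlen2,
      PySem.List.pyGetD_eq_getElem _ _ hposn (by simpa using hlen2), List.getElem_map]

-- ===== VERDICT (by name: the statement is the Claim_ definition above) =====
theorem solution_spec : Claim_equal_solution := by
  intro food_times k _ hpre
  unfold Spec_solution
  exact main_eq food_times k hpre
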